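-- pv_equiv track=rewrite | github.com/dkirby-ms/scoring | query.py | find_place_numeric
-- ===== SOURCE A (Python) =====
-- def find_place_numeric(rows, player):
--   """Given a list of two-tuple rows, returns the index at which the given
--   player name occurs in the two-tuples, or -1 if the player name is not
--   present in the list. The second element of each tuple is considered to be
--   a score. If any element has the same score as a preceding element, it is
--   treated as being at the same index."""
--   index = -1
--   last_num = None
--   for r in rows:
--     if last_num != r[1]:
--       index += 1
--     last_num = r[1]
--     if r[0] == player:
--       return index
--   return -1
-- ===== SOURCE B (Python) =====
-- def _group_rows(rows):
--     """Chunk rows into consecutive runs of equal score: [(score, [names...]), ...]."""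
--     groups = []
--     i = 0
--     n = len(rows)
--     while i < n:
--         score = rows[i][1]
--         members = []
--         while i < n and rows[i][1] == score:
--             members.append(rows[i][0])
--             i += 1
--         groups.append((score, members))
--     return groups
--
-- def find_place_numeric(rows, player):
--     idx = 0
--     for _score, members in _group_rows(rows):
--         if player in members:
--             return idx
--         idx += 1
--     return -1
-- ===== Notes on version B (the rewrite author's own statement) =====
-- stated objective: idiomatic
-- what changed: B first chunks the rows into consecutive equal-score groups and then returns the index of the first group containing the player, instead of A's single loop threading an index counter and a last-score sentinel through every row.
import Mathlib
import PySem

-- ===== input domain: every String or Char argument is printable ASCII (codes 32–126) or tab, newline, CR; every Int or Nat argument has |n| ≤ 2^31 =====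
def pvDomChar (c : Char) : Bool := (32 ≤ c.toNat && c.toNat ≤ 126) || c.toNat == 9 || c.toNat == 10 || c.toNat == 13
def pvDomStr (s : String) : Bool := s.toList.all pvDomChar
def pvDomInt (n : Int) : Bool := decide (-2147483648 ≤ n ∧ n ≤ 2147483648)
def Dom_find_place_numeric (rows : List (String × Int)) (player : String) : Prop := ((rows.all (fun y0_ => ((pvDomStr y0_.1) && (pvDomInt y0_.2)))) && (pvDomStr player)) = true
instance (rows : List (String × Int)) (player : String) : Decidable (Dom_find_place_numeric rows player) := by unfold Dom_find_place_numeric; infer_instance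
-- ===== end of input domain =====

-- B re-implements A by chunking the rows into consecutive equal-score groups and
-- returning the index of the first group containing the player (idiomatic decomposition).


-- ===== PORT A =====
-- A's loop: index counter, last_num sentinel (None → Option Int none)
def findA_loop : List (String × Int) → String → Int → Option Int → Int
  | [], _, _, _ => -1
  | (n, s) :: rs, player, index, last =>
    let index' := if last = some s then index else index + 1
    if n == player then index' else findA_loop rs player index' (some s)

def find_place_numeric (rows : List (String × Int)) (player : String) : Int :=
  findA_loop rows player (-1) none

-- ===== PORT B =====
-- inner while loop of _group_rows: collect names while the score stays equal
def spanScore (s : Int) : List (String × Int) → List String × List (String × Int)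
  | [] => ([], [])
  | (n, t) :: rs =>
    if t = s then
      let (ms, rest) := spanScore s rs
      (n :: ms, rest)
    else ([], (n, t) :: rs)

theorem spanScore_rest_len (s : Int) (rs : List (String × Int)) :
    (spanScore s rs).2.length ≤ rs.length := by
  induction rs with
  | nil => simp [spanScore]
  | cons h t ih =>
    obtain ⟨n, u⟩ := h
    by_cases hu : u = s <;> simp [spanScore, hu] <;> try omega

-- outer while loop of _group_rows
def groupRows : List (String × Int) → List (Int × List String)
  | [] => []
  | (n, s) :: rs =>
    let p := spanScore s rs
    (s, n :: p.1) :: groupRows p.2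
termination_by rs => rs.length
decreasing_by
  simpa using Nat.lt_succ_of_le (spanScore_rest_len s rs)

-- the for loop over groups with running idx
def scanGroups : List (Int × List String) → String → Int → Int
  | [], _, _ => -1
  | (_, ms) :: gs, player, idx =>
    if ms.contains player then idx else scanGroups gs player (idx + 1)

def find_place_numeric_alt (rows : List (String × Int)) (player : String) : Int :=
  scanGroups (groupRows rows) player 0

-- ===== PRECONDITION & SPEC =====
def Spec_find_place_numeric (rows : List (String × Int)) (player : String) (out : Int) : Prop := out = find_place_numeric_alt rows player
instance (rows : List (String × Int)) (player : String) (out : Int) : Decidable (Spec_find_place_numeric rows player out) := by unfold Spec_find_place_numeric; infer_instance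

-- ===== CLAIM (what is proved, stated in full; the proofs are below) =====
def Claim_equal_find_place_numeric : Prop := ∀ (rows : List (String × Int)) (player : String), Dom_find_place_numeric rows player → Spec_find_place_numeric rows player (find_place_numeric rows player)

-- ===== LEMMAS AND PROOFS =====

-- within a same-score run, A's loop does not increment and just scans the names
theorem findA_span (rs : List (String × Int)) (s : Int) (player : String) (j : Int) :
    findA_loop rs player j (some s) =
      if (spanScore s rs).1.contains player then j
      else findA_loop (spanScore s rs).2 player j (some s) := by
  induction rs with
  | nil => simp [spanScore, findA_loop]
  | cons h t ih =>
    obtain ⟨n, u⟩ := h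
    by_cases hu : u = s
    · subst hu
      by_cases hn : n = player
      · subst hn; simp [spanScore, findA_loop]
      · have hn' : (n == player) = false := by simpa using hn
        simp only [spanScore, findA_loop, hn', Bool.false_eq_true, if_false, reduceIte]
        rw [ih]
        have : ((n :: (spanScore u t).1).contains player) = ((spanScore u t).1.contains player) := by
          simp; intro h'; exact absurd h'.symm hn
        rw [this]
    · simp [spanScore, findA_loop, hu]

-- the leftover after spanScore starts with a different score (or is empty)
theorem spanScore_rest_head (s : Int) (rs : List (String × Int)) :
    ∀ n t rest, (spanScore s rs).2 = (n, t) :: rest → t ≠ s := by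
  induction rs with
  | nil => intro n t rest h; simp [spanScore] at h
  | cons h₀ tl ih =>
    obtain ⟨m, u⟩ := h₀
    intro n t rest h
    by_cases hu : u = s
    · simp only [spanScore, if_pos hu] at h
      exact ih n t rest h
    · simp only [spanScore, if_neg hu] at h
      cases h
      exact hu

-- if the next score differs (as spanScore guarantees), last = some s behaves like none
theorem findA_some_eq_none (rs : List (String × Int)) (s : Int) (player : String) (j : Int)
    (h : ∀ n t rest, rs = (n, t) :: rest → t ≠ s) :
    findA_loop rs player j (some s) = findA_loop rs player j none := by
  cases rs with
  | nil => rfl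
  | cons h₀ t =>
    obtain ⟨n, u⟩ := h₀
    have hu : u ≠ s := h n u t rfl
    have hsu : (some s = some u) = False := by simp; exact fun h' => hu h'.symm
    simp [findA_loop, hsu]

-- main invariant: A's loop from a fresh sentinel equals B's group scan
theorem findA_eq_scan (rows : List (String × Int)) (player : String) (k : Int) :
    findA_loop rows player k none = scanGroups (groupRows rows) player (k + 1) := by
  induction hL : rows.length using Nat.strong_induction_on generalizing rows k with
  | _ L ih =>
    cases rows with
    | nil => simp [findA_loop, groupRows, scanGroups]
    | cons h t =>
      obtain ⟨n, s⟩ := h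
      simp only [groupRows, scanGroups, findA_loop]
      by_cases hn : n = player
      · subst hn; simp
      · have hn' : (n == player) = false := by simpa using hn
        have hcons : ((n :: (spanScore s t).1).contains player) = ((spanScore s t).1.contains player) := by
          simp; intro h'; exact absurd h'.symm hn
        have hnone : (none = some s) = False := by simp
        simp only [hn', Bool.false_eq_true, if_false, hcons, hnone, if_false]
        rw [findA_span]
        by_cases hc : player ∈ (spanScore s t).1
        · simp [hc]
        · simp only [List.contains_eq_mem, hc, decide_false, Bool.false_eq_true, if_false]
          rw [findA_some_eq_none _ s player (k + 1)
              (fun n' t' rest' hrs => spanScore_rest_head s t n' t' rest' hrs)]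
          have hlen : (spanScore s t).2.length < L := by
            have := spanScore_rest_len s t
            subst hL; simp; omega
          exact ih _ hlen _ (k + 1) rfl

-- ===== VERDICT (by name: the statement is the Claim_ definition above) =====
theorem find_place_numeric_spec : Claim_equal_find_place_numeric := by
  intro rows player _
  show find_place_numeric rows player = find_place_numeric_alt rows player
  unfold find_place_numeric find_place_numeric_alt
  have := findA_eq_scan rows player (-1)
  simpa using this
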